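-- pv_equiv track=rewrite | github.com/yalulu222/Postech_minds-JBHS | data.py | add_third_value
-- ===== SOURCE A (Python) =====
-- def add_third_value(data):
--     result_data = []
--     n = len(data)
--
--     for i in range(n):
--         if i == 0 or i == n - 1:
--             result_data.append([data[i][0], data[i][1], 0])
--         else:
--             result_data.append([data[i][0], data[i][1], 1])
--
--     return result_data
-- ===== SOURCE B (Python) =====
-- def add_third_value(data):
--     if len(data) <= 1:
--         return [[row[0], row[1], 0] for row in data]
--     first = [[data[0][0], data[0][1], 0]]
--     middle = [[row[0], row[1], 1] for row in data[1:-1]]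
--     last = [[data[-1][0], data[-1][1], 0]]
--     return first + middle + last
-- ===== Notes on version B (the rewrite author's own statement) =====
-- stated objective: alternative
-- what changed: Replaces A's index loop with a per-position branch by a slicing decomposition: the result is built as head-segment ++ map over data[1:-1] ++ tail-segment, with a separate short-list case, so no index arithmetic or branch occurs inside any loop.
import Mathlib
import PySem

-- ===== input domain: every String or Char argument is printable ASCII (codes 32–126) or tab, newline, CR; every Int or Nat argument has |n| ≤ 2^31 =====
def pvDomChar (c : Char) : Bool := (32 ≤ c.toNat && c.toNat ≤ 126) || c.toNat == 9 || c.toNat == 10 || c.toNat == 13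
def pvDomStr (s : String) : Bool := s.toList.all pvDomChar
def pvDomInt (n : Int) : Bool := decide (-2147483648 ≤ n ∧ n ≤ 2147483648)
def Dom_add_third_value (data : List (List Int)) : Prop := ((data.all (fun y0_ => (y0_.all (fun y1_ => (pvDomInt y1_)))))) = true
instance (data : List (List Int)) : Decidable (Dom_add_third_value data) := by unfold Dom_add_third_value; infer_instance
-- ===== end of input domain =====

-- B builds the result by a slicing decomposition (head segment ++ map over data[1:-1] ++ tail
-- segment, with a short-list case) instead of A's indexed loop with a per-position branch
-- (objective: alternative). Equivalence on inputs whose rows all have length ≥ 2.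


-- ===== PORT A =====
def add_third_value (data : List (List Int)) : List (List Int) :=
  let n : Int := data.length
  (PySem.List.pyRange 0 n 1).foldl (fun result_data i =>
    if i = 0 ∨ i = n - 1 then
      result_data ++ [[PySem.List.pyGetD (PySem.List.pyGetD data i []) 0 0,
                       PySem.List.pyGetD (PySem.List.pyGetD data i []) 1 0, 0]]
    else
      result_data ++ [[PySem.List.pyGetD (PySem.List.pyGetD data i []) 0 0,
                       PySem.List.pyGetD (PySem.List.pyGetD data i []) 1 0, 1]]) []

-- ===== PORT B =====
def add_third_value_alt (data : List (List Int)) : List (List Int) :=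
  if data.length ≤ 1 then
    data.map (fun row => [PySem.List.pyGetD row 0 0, PySem.List.pyGetD row 1 0, (0 : Int)])
  else
    let first := [[PySem.List.pyGetD (PySem.List.pyGetD data 0 []) 0 0,
                   PySem.List.pyGetD (PySem.List.pyGetD data 0 []) 1 0, (0 : Int)]]
    let middle := (PySem.List.slice data (some 1) (some (-1))).map (fun row =>
      [PySem.List.pyGetD row 0 0, PySem.List.pyGetD row 1 0, (1 : Int)])
    let last := [[PySem.List.pyGetD (PySem.List.pyGetD data (-1) []) 0 0,
                  PySem.List.pyGetD (PySem.List.pyGetD data (-1) []) 1 0, (0 : Int)]]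
    first ++ middle ++ last

-- ===== PRECONDITION & SPEC =====
-- Pre_ excludes rows with fewer than two entries, on which the Python A raises IndexError.
def Pre_add_third_value (data : List (List Int)) : Prop :=
  ∀ row ∈ data, 2 ≤ row.length
instance (data : List (List Int)) : Decidable (Pre_add_third_value data) := by
  unfold Pre_add_third_value; infer_instance
def pvWitness_add_third_value : List (List Int) := [[1, 2], [3, 4], [5, 6]]
def Spec_add_third_value (data : List (List Int)) (out : List (List Int)) : Prop := out = add_third_value_alt data
instance (data : List (List Int)) (out : List (List Int)) : Decidable (Spec_add_third_value data out) := by unfold Spec_add_third_value; infer_instance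

-- ===== CLAIM (what is proved, stated in full; the proofs are below) =====
def Claim_equal_add_third_value : Prop := ∀ (data : List (List Int)), Dom_add_third_value data → Pre_add_third_value data → Spec_add_third_value data (add_third_value data)

-- ===== LEMMAS AND PROOFS =====

-- A's loop as a map over range(n)
theorem add_third_value_eq_map (data : List (List Int)) :
    add_third_value data =
      (PySem.List.pyRange 0 data.length 1).map (fun i =>
        [PySem.List.pyGetD (PySem.List.pyGetD data i []) 0 0,
         PySem.List.pyGetD (PySem.List.pyGetD data i []) 1 0,
         if i = 0 ∨ i = (data.length : Int) - 1 then 0 else 1]) := by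
  unfold add_third_value
  rw [PySem.List.foldl_congr_mem
    (g := fun result_data i =>
      result_data ++ [[PySem.List.pyGetD (PySem.List.pyGetD data i []) 0 0,
                       PySem.List.pyGetD (PySem.List.pyGetD data i []) 1 0,
                       if i = 0 ∨ i = (data.length : Int) - 1 then 0 else 1]])]
  · rw [PySem.List.foldl_append_singleton_eq_map]
    simp
  · intro acc x _
    split_ifs <;> rfl

theorem add_third_value_eq_alt (data : List (List Int)) :
    add_third_value data = add_third_value_alt data := by
  rw [add_third_value_eq_map]
  unfold add_third_value_alt
  by_cases h1 : data.length ≤ 1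
  · rw [if_pos h1]
    cases data with
    | nil => simp [PySem.List.pyRange]
    | cons r rs =>
      have hrs : rs = [] := by
        simp only [List.length_cons] at h1; exact List.eq_nil_of_length_eq_zero (by omega)
      subst hrs
      have hr : PySem.List.pyRange 0 ((1 : Nat) : Int) 1 = [0] := by decide
      simp only [List.length_cons, List.length_nil, Nat.zero_add]
      rw [hr]
      simp [PySem.List.pyGetD, PySem.List.pyGet?, PySem.List.pyIdx?]
  · rw [if_neg h1]
    have hslice : PySem.List.slice data (some 1) (some (-1))
        = (data.drop 1).take (data.length - 1 - 1) := by
      simp only [PySem.List.slice, PySem.List.clampIdx_neg_one]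
      have h1' : PySem.List.clampIdx data.length 1 = 1 := by
        simp [PySem.List.clampIdx]; omega
      rw [h1']
    rw [hslice]
    have hfirst : PySem.List.pyGetD data 0 [] = data[0]'(by omega) := by
      rw [show (0:Int) = ((0:Nat):Int) by norm_num, PySem.List.pyGetD_natCast]
      simp [List.getElem?_eq_getElem (by omega : 0 < data.length)]
    have hneg : PySem.List.pyGetD data (-1) [] = data[data.length - 1]'(by omega) := by
      rw [PySem.List.pyGetD_neg_ofNat data 1 [] (by omega) (by omega)]
    rw [hfirst, hneg]
    apply List.ext_getElem
    · simp [PySem.List.length_pyRange_one]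
      omega
    · intro k hk1 hk2
      have hk : k < data.length := by
        simpa [PySem.List.length_pyRange_one] using hk1
      rw [List.getElem_map, PySem.List.getElem_pyRange_one]
      have hrow : PySem.List.pyGetD data ((0 : Int) + (k : Int)) [] = data[k] := by
        rw [zero_add, PySem.List.pyGetD_natCast]
        simp [List.getElem?_eq_getElem hk]
      rw [hrow]
      simp only [List.getElem_append, List.length_append, List.length_map, List.length_take,
        List.length_drop, List.length_cons, List.length_nil]
      split_ifs with hc h2 h3 h4 h5
      · -- flag 0, k = 0
        have hk0 : k = 0 := by omega
        subst hk0
        simp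
      · -- flag 0 but middle position: impossible
        exfalso; rcases hc with hc | hc <;> omega
      · -- flag 0, last position
        have hidx : k - (0 + 1 + min (data.length - 1 - 1) (data.length - 1)) = 0 := by omega
        simp only [hidx, List.getElem_cons_zero]
        simp [show k = data.length - 1 from by omega]
      · -- flag 1 but k = 0: impossible
        exact absurd (Or.inl (by omega : (0:Int) + (k:Int) = 0)) hc
      · -- flag 1, middle
        rw [List.getElem_map, List.getElem_take, List.getElem_drop]
        simp only [show 1 + (k - (0 + 1)) = k from by omega]
      · -- flag 1 but last position: impossible
        exact absurd (Or.inr (by omega : (0:Int) + (k:Int) = (data.length : Int) - 1)) hc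

-- ===== VERDICT (by name: the statement is the Claim_ definition above) =====
theorem add_third_value_spec : Claim_equal_add_third_value := by
  intro data _ _
  unfold Spec_add_third_value
  exact add_third_value_eq_alt data
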